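-- pv_equiv track=rewrite | github.com/ShodmonovZafar/qudrat_abdurahimov | tanlangan_masalalar_80/amaliyot_1.py | f47
-- ===== SOURCE A (Python) =====
-- def f47(M):
--     rel = []
--     for j in range(len(M[0])):
--         s = 1
--         for i in range(len(M)):
--             s *= M[i][j]
--         rel.append(s)
--     return rel
-- ===== SOURCE B (Python) =====
-- def f47(M):
--     rel = [1] * len(M[0])
--     for row in M:
--         rel = [p * row[j] for j, p in enumerate(rel)]
--     return rel
-- ===== Notes on version B (the rewrite author's own statement) =====
-- stated objective: alternative
-- what changed: Column-major double loop with a scalar accumulator per column replaced by a single row-major pass that maintains a vector of running column products, rebuilt per row via enumerate.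
import Mathlib
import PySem

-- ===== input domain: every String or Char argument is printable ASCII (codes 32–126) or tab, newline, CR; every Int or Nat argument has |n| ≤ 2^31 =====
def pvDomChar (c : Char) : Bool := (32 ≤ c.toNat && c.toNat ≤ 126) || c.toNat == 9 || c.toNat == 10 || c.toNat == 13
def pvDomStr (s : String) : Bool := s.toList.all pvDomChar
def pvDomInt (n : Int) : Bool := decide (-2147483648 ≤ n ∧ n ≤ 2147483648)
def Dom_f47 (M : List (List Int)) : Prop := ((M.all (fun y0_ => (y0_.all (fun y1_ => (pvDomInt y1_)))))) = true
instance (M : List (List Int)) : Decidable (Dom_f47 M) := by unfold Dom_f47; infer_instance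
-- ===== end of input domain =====

-- B replaces A's column-major double loop (scalar accumulator per column) by one row-major
-- pass maintaining a vector of running column products (objective: alternative decomposition).


-- ===== PORT A =====
-- Literal port of A. Python raises IndexError on M[0] when M = [] and on M[i][j] when a row
-- is shorter than M[0]; those inputs are excluded by Pre_f47, so pyGetD's defaults are never hit.
def f47 (M : List (List Int)) : List Int :=
  (PySem.List.pyRange 0 ((PySem.List.pyGetD M 0 []).length : Int) 1).foldl
    (fun rel j =>
      rel ++ [(PySem.List.pyRange 0 (M.length : Int) 1).foldl
        (fun s i => s * PySem.List.pyGetD (PySem.List.pyGetD M i []) j 0) 1])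
    []

-- ===== PORT B =====
-- Literal port of Source B: rel = [1]*len(M[0]); per row, rel = [p * row[j] for j, p in enumerate(rel)].
def f47_alt (M : List (List Int)) : List Int :=
  M.foldl
    (fun rel row =>
      (PySem.List.enumerate rel 0).map (fun jp => jp.2 * PySem.List.pyGetD row jp.1 0))
    (List.replicate (PySem.List.pyGetD M 0 []).length 1)

-- ===== PRECONDITION & SPEC =====
-- Pre_ excludes exactly the inputs where Python A raises IndexError: the empty matrix
-- (M[0] raises) and ragged matrices with a row shorter than the first row (M[i][j] raises).
-- B raises on exactly the same inputs.
def Pre_f47 (M : List (List Int)) : Prop :=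
  M ≠ [] ∧ ∀ row ∈ M, (PySem.List.pyGetD M 0 []).length ≤ row.length
instance (M : List (List Int)) : Decidable (Pre_f47 M) := by unfold Pre_f47; infer_instance

def pvWitness_f47 : List (List Int) := [[1, 2], [3, 4]]

def Spec_f47 (M : List (List Int)) (out : List Int) : Prop := out = f47_alt M
instance (M : List (List Int)) (out : List Int) : Decidable (Spec_f47 M out) := by unfold Spec_f47; infer_instance

-- ===== CLAIM (what is proved, stated in full; the proofs are below) =====
def Claim_equal_f47 : Prop := ∀ (M : List (List Int)), Dom_f47 M → Pre_f47 M → Spec_f47 M (f47 M)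

-- ===== LEMMAS AND PROOFS =====

-- One row-step of B on a vector of the shape (pyRange 0 c 1).map f updates it pointwise.
theorem f47_step (c : Nat) (f : Int → Int) (row : List Int) :
    (PySem.List.enumerate ((PySem.List.pyRange 0 (c : Int) 1).map f) 0).map
        (fun jp => jp.2 * PySem.List.pyGetD row jp.1 0)
      = (PySem.List.pyRange 0 (c : Int) 1).map (fun j => f j * PySem.List.pyGetD row j 0) := by
  have hlen : PySem.List.len ((PySem.List.pyRange 0 (c : Int) 1).map f) = (c : Int) := by
    simp [PySem.List.len, PySem.List.length_pyRange_one]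
  rw [PySem.List.enumerate_eq_map_pyRange ((PySem.List.pyRange 0 (c : Int) 1).map f) 0, hlen,
    List.map_map]
  refine List.map_congr_left ?_
  intro j hj
  have hj' := (PySem.List.mem_pyRange_one).1 hj
  simp only [Function.comp]
  rw [PySem.List.pyGetD_map_pyRange_of_nonneg f (c : Int) j 0 hj'.1 hj'.2]

-- Folding B's row step over the rows computes, per column index, A's scalar fold.
theorem f47_fold (c : Nat) (rows : List (List Int)) : ∀ (f : Int → Int),
    rows.foldl
        (fun rel row =>
          (PySem.List.enumerate rel 0).map (fun jp => jp.2 * PySem.List.pyGetD row jp.1 0))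
        ((PySem.List.pyRange 0 (c : Int) 1).map f)
      = (PySem.List.pyRange 0 (c : Int) 1).map
          (fun j => rows.foldl (fun s row => s * PySem.List.pyGetD row j 0) (f j)) := by
  induction rows with
  | nil => intro f; simp
  | cons row rest ih =>
      intro f
      simp only [List.foldl_cons]
      rw [f47_step c f row, ih (fun j => f j * PySem.List.pyGetD row j 0)]

theorem replicate_eq_map_pyRange (c : Nat) :
    List.replicate c (1 : Int)
      = (PySem.List.pyRange 0 (c : Int) 1).map (fun _ => (1 : Int)) := by
  rw [List.map_const', PySem.List.length_pyRange_one]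
  simp

-- The equality in fact holds for the ports on every input (the defaults coincide).
theorem f47_eq (M : List (List Int)) : f47 M = f47_alt M := by
  unfold f47 f47_alt
  rw [PySem.List.foldl_append_singleton_eq_map, List.nil_append]
  rw [replicate_eq_map_pyRange, f47_fold]
  refine List.map_congr_left ?_
  intro j _
  rw [PySem.List.foldl_pyRange_zero_pyGetD' M []
        (fun s row => s * PySem.List.pyGetD row j 0) 1]

-- ===== VERDICT (by name: the statement is the Claim_ definition above) =====
theorem f47_spec : Claim_equal_f47 := by
  intro M _ _
  unfold Spec_f47
  exact f47_eq M
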